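-- pv_equiv track=rewrite | github.com/rkdurd34/algorithm | practice/C_D.py | pair_search
-- ===== SOURCE A (Python) =====
-- def pair_search(arr1,arr2):
--     pair_search_1 = {}
--     pair_search_2 = {}
--
--     for i in arr1:
--         pair_num = arr1.count(i)
--         if pair_num >4:
--             pair_num=4
--
--         if pair_num > 1:
--             if pair_search_1 =={}:
--                 pair_search_1[i] = pair_num
--             elif pair_search_1[list(pair_search_1.keys())[0]] < pair_num:
--                 pair_search_1.clear()
--                 pair_search_1[i] = pair_num
--             elif pair_search_1[list(pair_search_1.keys())[0]] == pair_num and list(pair_search_1.keys())[0] < i: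
--                 pair_search_1.clear()
--                 pair_search_1[i] = pair_num
--     if pair_search_1 == {}:
--         pair_search_1['none'] = 0
--
--     for i in arr2:
--         pair_num = arr2.count(i)
--         if pair_num >4:
--             pair_num=4
--
--         if pair_num > 1:
--             if pair_search_2 =={}:
--                 pair_search_2[i] = pair_num
--             elif pair_search_2[list(pair_search_2.keys())[0]] < pair_num:
--                 pair_search_2.clear()
--                 pair_search_2[i] = pair_num
--             elif pair_search_2[list(pair_search_2.keys())[0]] == pair_num and list(pair_search_2.keys())[0] < i:
--                 pair_search_2.clear()
--                 pair_search_2[i] = pair_num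
--     if pair_search_2 == {}:
--         pair_search_2["none"] = 0
--     return [pair_search_1,pair_search_2]
-- ===== SOURCE B (Python) =====
-- def pair_search(arr1, arr2):
--     def best_of(arr):
--         s = sorted(arr)
--         n = len(s)
--         best = None
--         i = 0
--         while i < n:
--             j = i + 1
--             while j < n and s[j] == s[i]:
--                 j += 1
--             run = j - i
--             if run >= 2:
--                 capped = min(run, 4)
--                 if best is None or (capped, s[i]) > (best[1], best[0]):
--                     best = (s[i], capped)
--             i = j
--         if best is None:
--             return {'none': 0}
--         return {best[0]: best[1]}
--     return [best_of(arr1), best_of(arr2)]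
-- ===== Notes on version B (the rewrite author's own statement) =====
-- stated objective: faster
-- what changed: B sorts each array once and scans consecutive runs to get capped counts in one pass, replacing A's per-element arr.count rescans and incremental singleton-dict argmax.
import Mathlib
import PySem

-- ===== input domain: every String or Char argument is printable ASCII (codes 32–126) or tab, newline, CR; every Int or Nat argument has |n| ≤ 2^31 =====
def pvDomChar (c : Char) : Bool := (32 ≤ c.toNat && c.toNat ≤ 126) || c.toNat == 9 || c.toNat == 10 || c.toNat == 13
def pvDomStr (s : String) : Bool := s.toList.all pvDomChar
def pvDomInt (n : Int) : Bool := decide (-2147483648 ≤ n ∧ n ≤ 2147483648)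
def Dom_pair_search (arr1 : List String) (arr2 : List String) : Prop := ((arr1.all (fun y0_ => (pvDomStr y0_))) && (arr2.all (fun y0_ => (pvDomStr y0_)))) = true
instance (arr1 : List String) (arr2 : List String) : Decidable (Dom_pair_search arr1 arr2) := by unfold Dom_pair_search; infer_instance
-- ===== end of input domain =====

-- B replaces A's quadratic repeated arr.count scans and incremental dict argmax by sort-then-scan over
-- runs of equal elements, picking the best (capped count, value) pair; same return value everywhere.

-- ===== PORT A =====
-- the loop 'for i in arr: …' updating the singleton dict pair_search_k; the dict holds at most one entry,
-- so list(d.keys())[0] / d[that key] are read off the head of d.items (exactly Python's first key/value).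
def pvStepA (arr : List String) (d : PySem.Dict String Int) (i : String) : PySem.Dict String Int :=
  let pn0 : Int := (PySem.List.count arr i : Int)
  let pn : Int := if pn0 > 4 then 4 else pn0
  if pn > 1 then
    match d.items with
    | [] => d.insert i pn                                   -- if pair_search_k == {}
    | (k0, v0) :: _ =>
      if v0 < pn then PySem.Dict.empty.insert i pn          -- clear(); d[i] = pn
      else if v0 = pn ∧ k0 < i then PySem.Dict.empty.insert i pn
      else d
  else d

def pvLoopA (arr : List String) : PySem.Dict String Int :=
  arr.foldl (pvStepA arr) PySem.Dict.empty

def pair_search (arr1 : List String) (arr2 : List String) : List (List (String × Int)) :=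
  let d1 := pvLoopA arr1
  let d1 := if d1.items = [] then d1.insert "none" 0 else d1
  let d2 := pvLoopA arr2
  let d2 := if d2.items = [] then d2.insert "none" 0 else d2
  [d1.items, d2.items]

-- ===== PORT B =====
-- Source B's while loop over the sorted copy: each step consumes one run of equal elements
-- (j scans while s[j] == s[i] ⇒ run = takeWhile-length + 1; i = j ⇒ recurse on dropWhile).
def pvBestLoop (best : Option (String × Int)) (s : List String) : Option (String × Int) :=
  match s with
  | [] => best
  | x :: rest =>
      let run : Int := 1 + (rest.takeWhile (fun y => y == x)).length
      let best' :=
        if run ≥ 2 then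
          let capped := min run 4
          match best with
          | none => some (x, capped)
          | some (bv, bc) =>
              if bc < capped ∨ (bc = capped ∧ bv < x) then some (x, capped)   -- (capped, x) > (bc, bv)
              else some (bv, bc)
        else best
      pvBestLoop best' (rest.dropWhile (fun y => y == x))
termination_by s.length
decreasing_by
  simp only [List.length_cons]
  exact Nat.lt_succ_of_le (List.length_dropWhile_le _ _)

def pvEmit (o : Option (String × Int)) : List (String × Int) :=
  match o with
  | none => [("none", 0)]
  | some (v, c) => [(v, c)]

def pair_search_alt (arr1 : List String) (arr2 : List String) : List (List (String × Int)) :=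
  [pvEmit (pvBestLoop none (PySem.List.sorted arr1 (fun x => x) false)),
   pvEmit (pvBestLoop none (PySem.List.sorted arr2 (fun x => x) false))]

-- ===== PRECONDITION & SPEC =====
def Spec_pair_search (arr1 : List String) (arr2 : List String) (out : List (List (String × Int))) : Prop := out = pair_search_alt arr1 arr2
instance (arr1 : List String) (arr2 : List String) (out : List (List (String × Int))) : Decidable (Spec_pair_search arr1 arr2 out) := by unfold Spec_pair_search; infer_instance

-- ===== CLAIM (what is proved, stated in full; the proofs are below) =====
def Claim_equal_pair_search : Prop := ∀ (arr1 : List String) (arr2 : List String), Dom_pair_search arr1 arr2 → Spec_pair_search arr1 arr2 (pair_search arr1 arr2)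

-- ===== LEMMAS AND PROOFS =====

-- the strict "better" order on (value, capped) entries: compare capped, then value
def pvLt (a b : String × Int) : Bool := a.2 < b.2 || (a.2 == b.2 && a.1 < b.1)

-- the common max-accumulating step both loops perform
def pvOp (b : Option (String × Int)) (e : String × Int) : Option (String × Int) :=
  match b with
  | none => some e
  | some be => if pvLt be e then some e else some be

def pvCap (n : Int) : Int := if n > 4 then 4 else n

-- candidates contributed by A's loop: one per occurrence
def pvCandsA (arr : List String) : List (String × Int) :=
  arr.filterMap (fun i => if pvCap ((arr.count i : Nat) : Int) > 1 then some (i, pvCap ((arr.count i : Nat) : Int)) else none)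

-- the runs of a list: (value, run length) for each maximal block of equal consecutive elements
def pvRuns (s : List String) : List (String × Int) :=
  match s with
  | [] => []
  | x :: rest => (x, 1 + (rest.takeWhile (fun y => y == x)).length) :: pvRuns (rest.dropWhile (fun y => y == x))
termination_by s.length
decreasing_by
  simp only [List.length_cons]
  exact Nat.lt_succ_of_le (List.length_dropWhile_le _ _)

def pvCandsB (s : List String) : List (String × Int) :=
  s |> pvRuns |>.filterMap (fun p => if p.2 ≥ 2 then some (p.1, min p.2 4) else none)

lemma pvLt_trans {a b c : String × Int} (h1 : pvLt a b) (h2 : pvLt b c) : pvLt a c := by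
  simp only [pvLt, Bool.or_eq_true, Bool.and_eq_true, decide_eq_true_eq, beq_iff_eq] at *
  rcases h1 with h1 | ⟨h1, h1'⟩ <;> rcases h2 with h2 | ⟨h2, h2'⟩
  · exact Or.inl (lt_trans h1 h2)
  · exact Or.inl (h2 ▸ h1)
  · exact Or.inl (h1 ▸ h2)
  · exact Or.inr ⟨h1.trans h2, lt_trans h1' h2'⟩

lemma pvLt_total {a b : String × Int} (h1 : ¬ pvLt a b) (h2 : ¬ pvLt b a) : a = b := by
  simp only [pvLt, Bool.or_eq_true, Bool.and_eq_true, decide_eq_true_eq, beq_iff_eq, not_or,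
    not_and] at h1 h2
  have h2v : a.2 = b.2 := le_antisymm (not_lt.mp h2.1) (not_lt.mp h1.1)
  have h1v : a.1 = b.1 := le_antisymm (not_lt.mp (h2.2 h2v.symm)) (not_lt.mp (h1.2 h2v))
  exact Prod.ext h1v h2v

-- foldl pvOp from some b0 yields a maximum of b0 :: l
lemma pvFoldl_op_some (l : List (String × Int)) : ∀ (b0 : String × Int),
    ∃ m, l.foldl pvOp (some b0) = some m ∧ (m = b0 ∨ m ∈ l) ∧ ¬ pvLt m b0 ∧ ∀ e ∈ l, ¬ pvLt m e := by
  induction l with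
  | nil =>
    intro b0
    refine ⟨b0, rfl, Or.inl rfl, ?_, by simp⟩
    simp [pvLt]
  | cons e l ih =>
    intro b0
    simp only [List.foldl_cons, pvOp]
    by_cases h : pvLt b0 e
    · rw [if_pos h]
      obtain ⟨m, hm, hmem, hnb, hall⟩ := ih e
      refine ⟨m, hm, ?_, ?_, ?_⟩
      · rcases hmem with rfl | hm'
        · exact Or.inr (List.mem_cons_self)
        · exact Or.inr (List.mem_cons_of_mem _ hm')
      · intro hc; exact hnb (pvLt_trans hc h)
      · intro x hx
        rcases List.mem_cons.mp hx with rfl | hx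
        · exact hnb
        · exact hall x hx
    · rw [if_neg h]
      obtain ⟨m, hm, hmem, hnb, hall⟩ := ih b0
      refine ⟨m, hm, ?_, hnb, ?_⟩
      · rcases hmem with rfl | hm'
        · exact Or.inl rfl
        · exact Or.inr (List.mem_cons_of_mem _ hm')
      · intro x hx
        rcases List.mem_cons.mp hx with rfl | hx
        · intro hc
          rcases Bool.eq_false_or_eq_true (pvLt b0 m) with hb | hb
          · exact h (pvLt_trans hb hc)
          · have hmb : m = b0 := pvLt_total hnb (by simp [hb])
            subst hmb
            exact h hc
        · exact hall x hx

lemma pvFoldl_op_none (l : List (String × Int)) (hl : l ≠ []) :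
    ∃ m, l.foldl pvOp none = some m ∧ m ∈ l ∧ ∀ e ∈ l, ¬ pvLt m e := by
  cases l with
  | nil => exact absurd rfl hl
  | cons e l =>
    obtain ⟨m, hm, hmem, hnb, hall⟩ := pvFoldl_op_some l e
    refine ⟨m, by simpa [pvOp] using hm, ?_, ?_⟩
    · rcases hmem with rfl | hm'
      · exact List.mem_cons_self
      · exact List.mem_cons_of_mem _ hm'
    · intro x hx
      rcases List.mem_cons.mp hx with rfl | hx
      · exact hnb
      · exact hall x hx

-- two candidate lists with the same members fold to the same maximum
lemma pvFoldl_op_eq_of_mem_iff (l1 l2 : List (String × Int))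
    (h : ∀ e, e ∈ l1 ↔ e ∈ l2) : l1.foldl pvOp none = l2.foldl pvOp none := by
  rcases eq_or_ne l1 [] with rfl | h1
  · have : l2 = [] := by
      cases l2 with
      | nil => rfl
      | cons e l => exact absurd ((h e).mpr (by simp)) (by simp)
    rw [this]
  · have h2 : l2 ≠ [] := by
      cases l1 with
      | nil => exact absurd rfl h1
      | cons e l =>
        intro hc
        exact absurd ((h e).mp (by simp)) (by simp [hc])
    obtain ⟨m1, hm1, hmem1, hall1⟩ := pvFoldl_op_none l1 h1
    obtain ⟨m2, hm2, hmem2, hall2⟩ := pvFoldl_op_none l2 h2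
    rw [hm1, hm2]
    have e12 : m1 = m2 := pvLt_total (hall1 m2 ((h m2).mpr hmem2)) (hall2 m1 ((h m1).mp hmem1))
    rw [e12]

-- ==== A's loop is foldl pvOp over pvCandsA ====

def pvToDict (o : Option (String × Int)) : PySem.Dict String Int :=
  match o with
  | none => PySem.Dict.empty
  | some (k, v) => PySem.Dict.empty.insert k v

lemma pvItems_toDict_insert (k : String) (v : Int) :
    ((PySem.Dict.empty : PySem.Dict String Int).insert k v).items = [(k, v)] := by
  simp [PySem.Dict.items_insert]
  rfl

def pvStepO (arr : List String) (b : Option (String × Int)) (i : String) : Option (String × Int) :=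
  match (if pvCap ((arr.count i : Nat) : Int) > 1 then some (i, pvCap ((arr.count i : Nat) : Int)) else none) with
  | some x => pvOp b x
  | none => b

lemma pvCandsA_foldl (arr : List String) (b : Option (String × Int)) :
    (pvCandsA arr).foldl pvOp b = arr.foldl (pvStepO arr) b := by
  unfold pvCandsA
  suffices H : ∀ (l : List String) (b : Option (String × Int)),
      (l.filterMap (fun i => if pvCap ((arr.count i : Nat) : Int) > 1 then some (i, pvCap ((arr.count i : Nat) : Int)) else none)).foldl pvOp b
        = l.foldl (pvStepO arr) b by exact H arr b
  intro l
  induction l with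
  | nil => intro b; rfl
  | cons a l ih =>
    intro b
    by_cases h : pvCap ((arr.count a : Nat) : Int) > 1 <;>
      simp [h, pvStepO, ih]

lemma pvStepA_toDict (arr : List String) (b : Option (String × Int)) (i : String) :
    pvStepA arr (pvToDict b) i = pvToDict (pvStepO arr b i) := by
  unfold pvStepA pvStepO
  simp only [PySem.List.count_eq, pvCap]
  cases b with
  | none =>
    split_ifs with h1 <;> simp_all [pvToDict, pvOp, PySem.Dict.empty]
  | some be =>
    obtain ⟨k, v⟩ := be
    simp only [pvToDict, pvItems_toDict_insert, pvOp, pvLt]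
    split_ifs with h1 h2 h3 h4 h5 <;> simp_all <;>
      first
      | omega
      | (rw [if_neg (by
            rintro (hlt | ⟨hv, hki⟩)
            · omega
            · exact absurd hki (not_lt.mpr (by simp_all)))])

lemma pvLoopA_eq (arr : List String) :
    pvLoopA arr = pvToDict ((pvCandsA arr).foldl pvOp none) := by
  unfold pvLoopA
  rw [pvCandsA_foldl]
  suffices H : ∀ (l : List String) (b : Option (String × Int)),
      l.foldl (pvStepA arr) (pvToDict b) = pvToDict (l.foldl (pvStepO arr) b) by
    exact H arr none
  intro l
  induction l with
  | nil => intro b; rfl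
  | cons a l ih =>
    intro b
    rw [List.foldl_cons, List.foldl_cons, pvStepA_toDict, ih]

-- ==== B's loop is foldl pvOp over pvCandsB ====

lemma pvCandsB_cons (x : String) (rest : List String) :
    pvCandsB (x :: rest)
      = (if (1 + ((rest.takeWhile (fun y => y == x)).length : Int)) ≥ 2 then
          [(x, min (1 + ((rest.takeWhile (fun y => y == x)).length : Int)) 4)] else [])
        ++ pvCandsB (rest.dropWhile (fun y => y == x)) := by
  unfold pvCandsB
  rw [pvRuns]
  by_cases h : (1 + ((rest.takeWhile (fun y => y == x)).length : Int)) ≥ 2 <;>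
    simp [h]

lemma pvBestLoop_eq (s : List String) : ∀ b, pvBestLoop b s = (pvCandsB s).foldl pvOp b := by
  induction s using pvRuns.induct with
  | case1 =>
    intro b
    rw [pvBestLoop]
    unfold pvCandsB
    rw [pvRuns]
    rfl
  | case2 x rest ih =>
    intro b
    rw [pvBestLoop, pvCandsB_cons]
    rw [List.foldl_append, ← ih]
    congr 1
    by_cases h : (1 + ((rest.takeWhile (fun y => y == x)).length : Int)) ≥ 2
    · rw [if_pos h, if_pos h]
      cases b with
      | none => rfl
      | some be =>
        obtain ⟨bv, bc⟩ := be
        simp only [List.foldl_cons, List.foldl_nil, pvOp, pvLt]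
        by_cases h2 : bc < min (1 + ((rest.takeWhile (fun y => y == x)).length : Int)) 4 ∨
            (bc = min (1 + ((rest.takeWhile (fun y => y == x)).length : Int)) 4 ∧ bv < x)
        · rw [if_pos h2, if_pos (by
            rcases h2 with h2 | ⟨h2, h2'⟩
            · simp [h2]
            · simp [h2, h2'])]
        · rw [if_neg h2, if_neg (by
            simp only [Bool.or_eq_true, Bool.and_eq_true, decide_eq_true_eq, beq_iff_eq]
            tauto)]
    · rw [if_neg h, if_neg h]
      rfl

-- ==== runs of a sorted list = (value, count) for each member ====

lemma pvNotMemDrop (x : String) : ∀ (l : List String), l.Pairwise (· ≤ ·) →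
    (∀ y ∈ l, x ≤ y) → x ∉ l.dropWhile (fun y => y == x) := by
  intro l
  induction l with
  | nil => simp
  | cons y ys ih =>
    intro hp hle
    by_cases hxy : (y == x) = true
    · simp only [List.dropWhile_cons, hxy, if_true]
      exact ih (List.Pairwise.of_cons hp) (fun z hz => hle z (List.mem_cons_of_mem _ hz))
    · simp only [List.dropWhile_cons, hxy]
      have hyx : x ≠ y := fun h => hxy (by simp [h])
      have hxlt : x < y := lt_of_le_of_ne (hle y List.mem_cons_self) hyx
      intro hmem
      rcases List.mem_cons.mp hmem with rfl | hmem
      · exact lt_irrefl _ hxlt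
      · exact absurd (lt_of_lt_of_le hxlt ((List.pairwise_cons.mp hp).1 _ hmem)) (lt_irrefl x)

lemma pvRuns_mem : ∀ (s : List String), s.Pairwise (· ≤ ·) → ∀ (v : String) (r : Int),
    ((v, r) ∈ pvRuns s ↔ v ∈ s ∧ r = (s.count v : Int)) := by
  intro s
  induction s using pvRuns.induct with
  | case1 =>
    intro _ v r
    rw [pvRuns]
    simp
  | case2 x rest ih =>
    intro hs v r
    have htall : ∀ y ∈ rest.takeWhile (fun y => y == x), y = x :=
      fun y hy => by simpa using List.mem_takeWhile_imp hy
    have hp' : rest.Pairwise (· ≤ ·) := hs.of_cons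
    have hd_pw : (rest.dropWhile (fun y => y == x)).Pairwise (· ≤ ·) :=
      hp'.sublist (List.dropWhile_sublist _)
    have hxd : x ∉ rest.dropWhile (fun y => y == x) :=
      pvNotMemDrop x rest hp' (fun y hy => (List.pairwise_cons.mp hs).1 y hy)
    have hrest : rest.takeWhile (fun y => y == x) ++ rest.dropWhile (fun y => y == x) = rest :=
      List.takeWhile_append_dropWhile
    have hsplit : ∀ w, rest.count w = (rest.takeWhile (fun y => y == x)).count w
        + (rest.dropWhile (fun y => y == x)).count w := by
      intro w
      conv_lhs => rw [← hrest]
      rw [List.count_append]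
    have hcx : (x :: rest).count x = 1 + (rest.takeWhile (fun y => y == x)).length := by
      rw [List.count_cons_self, hsplit x,
        List.count_eq_length.mpr (fun b hb => (htall b hb).symm),
        List.count_eq_zero.mpr hxd]
      omega
    have hcne : ∀ w, w ≠ x → (x :: rest).count w
        = (rest.dropWhile (fun y => y == x)).count w := by
      intro w hw
      rw [List.count_cons_of_ne (Ne.symm hw), hsplit w,
        List.count_eq_zero.mpr (fun hc => hw (htall w hc))]
      omega
    rw [pvRuns]
    constructor
    · intro h
      rcases List.mem_cons.mp h with heq | hmem
      · rw [Prod.mk.injEq] at heq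
        obtain ⟨rfl, rfl⟩ := heq
        refine ⟨List.mem_cons_self, ?_⟩
        rw [hcx]; push_cast; ring
      · obtain ⟨hvd, hr⟩ := (ih hd_pw v r).mp hmem
        have hvx : v ≠ x := fun h => hxd (h ▸ hvd)
        refine ⟨List.mem_cons_of_mem _ (by rw [← hrest]; exact List.mem_append_right _ hvd), ?_⟩
        rw [hcne v hvx]; exact hr
    · rintro ⟨hmem, rfl⟩
      by_cases hvx : v = x
      · subst hvx
        apply List.mem_cons.mpr
        left
        rw [Prod.mk.injEq]
        refine ⟨rfl, ?_⟩
        rw [hcx]; push_cast; ring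
      · have hvrest : v ∈ rest := by
          rcases List.mem_cons.mp hmem with rfl | h
          · exact absurd rfl hvx
          · exact h
        have hvd : v ∈ rest.dropWhile (fun y => y == x) := by
          rw [← hrest] at hvrest
          rcases List.mem_append.mp hvrest with h | h
          · exact absurd (htall v h) hvx
          · exact h
        exact List.mem_cons_of_mem _ ((ih hd_pw v _).mpr ⟨hvd, by rw [hcne v hvx]⟩)

-- ==== candidate sets agree ====

lemma pvSorted_pairwise (arr : List String) :
    (PySem.List.sorted arr (fun x => x) false).Pairwise (· ≤ ·) := by
  have h := PySem.List.sorted_pairwise (xs := arr) (key := fun x => x)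
  simpa using h

lemma pvCount_sorted (arr : List String) (v : String) :
    (PySem.List.sorted arr (fun x => x) false).count v = arr.count v :=
  (PySem.List.sorted_perm (xs := arr) (key := fun x => x) (rev := false)).count_eq v

lemma pvCands_mem_iff (arr : List String) (e : String × Int) :
    e ∈ pvCandsA arr ↔ e ∈ pvCandsB (PySem.List.sorted arr (fun x => x) false) := by
  constructor
  · intro h
    simp only [pvCandsA, List.mem_filterMap] at h
    obtain ⟨i, hi, hif⟩ := h
    by_cases hc : pvCap ((arr.count i : Nat) : Int) > 1
    · rw [if_pos hc] at hif
      obtain rfl := Option.some_inj.mp hif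
      have hc2 : (2 : Int) ≤ ((arr.count i : Nat) : Int) := by
        simp only [pvCap] at hc; split_ifs at hc <;> omega
      simp only [pvCandsB, List.mem_filterMap]
      refine ⟨(i, (((PySem.List.sorted arr (fun x => x) false).count i : Nat) : Int)), ?_, ?_⟩
      · exact (pvRuns_mem _ (pvSorted_pairwise arr) i _).mpr
          ⟨(PySem.List.mem_sorted _ _ _ _).mpr hi, rfl⟩
      · rw [pvCount_sorted, if_pos (by simpa using hc2)]
        refine congrArg some (Prod.ext rfl ?_)
        simp only [pvCap]
        split_ifs with h4 <;> omega
    · rw [if_neg hc] at hif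
      exact absurd hif (by simp)
  · intro h
    simp only [pvCandsB, List.mem_filterMap] at h
    obtain ⟨p, hp, hif⟩ := h
    obtain ⟨v, r⟩ := p
    obtain ⟨hv, rfl⟩ := (pvRuns_mem _ (pvSorted_pairwise arr) v r).mp hp
    rw [pvCount_sorted] at hif
    by_cases hr : ((arr.count v : Nat) : Int) ≥ 2
    · rw [if_pos hr] at hif
      obtain rfl := Option.some_inj.mp hif
      simp only [pvCandsA, List.mem_filterMap]
      refine ⟨v, (PySem.List.mem_sorted _ _ _ _).mp hv, ?_⟩
      rw [if_pos (by simp only [pvCap]; split_ifs <;> omega)]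
      refine congrArg some (Prod.ext rfl ?_)
      simp only [pvCap]
      split_ifs with h4 <;> omega
    · rw [if_neg hr] at hif
      exact absurd hif (by simp)

lemma pvSide_eq (arr : List String) :
    (if (pvLoopA arr).items = [] then (pvLoopA arr).insert "none" 0 else pvLoopA arr).items
      = pvEmit (pvBestLoop none (PySem.List.sorted arr (fun x => x) false)) := by
  rw [pvLoopA_eq, pvBestLoop_eq,
    ← pvFoldl_op_eq_of_mem_iff _ _ (pvCands_mem_iff arr)]
  cases hF : (pvCandsA arr).foldl pvOp none with
  | none => simp [pvToDict, pvEmit, PySem.Dict.empty, PySem.Dict.items_insert]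
  | some kv =>
    obtain ⟨k, v⟩ := kv
    simp [pvToDict, pvEmit, pvItems_toDict_insert]


-- ===== VERDICT (by name: the statement is the Claim_ definition above) =====
theorem pair_search_spec : Claim_equal_pair_search := by
  intro arr1 arr2 _
  show pair_search arr1 arr2 = pair_search_alt arr1 arr2
  simp only [pair_search, pair_search_alt, pvSide_eq]
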